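-- pv_equiv track=rewrite | github.com/rikkim2/daeseungtax | admins/app/mngVat/views.py | parse_record_17
-- ===== SOURCE A (Python) =====
-- def parse_record_17(record_17):
--   length_17 = 0
--   mainIssue_17 = [None] * 86  # 인덱스 1부터 사용하기 위해 크기 86의 리스트 생성
--
--   for m in range(1, 86):
--       if m == 1 or m == 74:
--           mainIssue_17[m] = record_17[length_17:length_17 + 2]
--           length_17 += 2
--       elif m in [3, 7, 8, 12, 24, 25, 26, 44, 56, 59, 60, 67, 69, 71, 72, 73, 82, 85]:
--           mainIssue_17[m] = record_17[length_17:length_17 + 15]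
--           length_17 += 15
--       elif m in [75, 80]:
--           mainIssue_17[m] = record_17[length_17:length_17 + 3]
--           length_17 += 3
--       elif m == 76:
--           mainIssue_17[m] = record_17[length_17:length_17 + 20]
--           length_17 += 20
--       elif m == 77:
--           mainIssue_17[m] = record_17[length_17:length_17 + 9]
--           length_17 += 9
--       elif m == 78:
--           mainIssue_17[m] = record_17[length_17:length_17 + 30]		#MidUnion(record_17, length_17, 30)
--           length_17 += 30
--       elif m == 79:
--           mainIssue_17[m] = record_17[length_17:length_17 + 8]
--           length_17 += 8
--       elif m in [81, 83, 84]: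
--           mainIssue_17[m] = record_17[length_17:length_17 + 1]
--           length_17 += 1
--       elif m == 2:
--           mainIssue_17[m] = record_17[length_17:length_17 + 7]
--           length_17 += 7
--       else:
--           mainIssue_17[m] = record_17[length_17:length_17 + 13]
--           length_17 += 13
--   return mainIssue_17
-- ===== SOURCE B (Python) =====
-- # Recursive string-consuming decomposition: instead of a cursor/offsets into the
-- # original record, chop the head field off the remaining string and recurse on the
-- # suffix.  Correct because record[i:i+w] == remaining[:w] when remaining == record[i:],
-- # and Python slicing clamps identically on the suffix.
-- WIDTHS_17 = [2, 7, 15, 13, 13, 13, 15, 15, 13, 13, 13, 15, 13, 13, 13, 13, 13,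
--              13, 13, 13, 13, 13, 13, 15, 15, 15, 13, 13, 13, 13, 13, 13, 13,
--              13, 13, 13, 13, 13, 13, 13, 13, 13, 13, 15, 13, 13, 13, 13, 13,
--              13, 13, 13, 13, 13, 13, 15, 13, 13, 15, 15, 13, 13, 13, 13, 13,
--              13, 15, 13, 15, 13, 15, 15, 15, 2, 3, 20, 9, 30, 8, 3, 1, 15, 1,
--              1, 15]
--
-- def _chop(s, ws):
--     if not ws:
--         return []
--     return [s[:ws[0]]] + _chop(s[ws[0]:], ws[1:])
--
-- def parse_record_17(record_17):
--     return [None] + _chop(record_17, WIDTHS_17)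
-- ===== Notes on version B (the rewrite author's own statement) =====
-- stated objective: alternative
-- what changed: Replaces A's cursor-with-if/elif-chain single pass by a recursive string-consuming decomposition: each step slices the head field off the remaining suffix and recurses on the rest, so there is no offset arithmetic at all.
import Mathlib
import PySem

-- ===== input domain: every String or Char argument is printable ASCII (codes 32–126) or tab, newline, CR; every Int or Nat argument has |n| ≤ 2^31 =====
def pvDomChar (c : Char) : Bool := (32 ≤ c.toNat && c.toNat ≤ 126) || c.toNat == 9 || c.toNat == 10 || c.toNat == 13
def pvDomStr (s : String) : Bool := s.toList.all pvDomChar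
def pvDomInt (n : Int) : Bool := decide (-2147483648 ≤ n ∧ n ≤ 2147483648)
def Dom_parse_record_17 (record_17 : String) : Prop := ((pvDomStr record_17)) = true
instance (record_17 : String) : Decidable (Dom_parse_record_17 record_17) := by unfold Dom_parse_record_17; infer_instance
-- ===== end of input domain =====

-- B replaces A's cursor + if/elif width chain by a recursive string-consuming
-- decomposition: chop the head field off the remaining suffix and recurse (objective: alternative).

-- ===== PORT A =====
def parse_record_17 (record_17 : String) : List (Option String) :=
  let init : Int × List (Option String) := (0, List.replicate 86 none)
  let final :=
    (PySem.List.pyRange 1 86 1).foldl (fun st m =>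
      let length_17 := st.1
      let mainIssue_17 := st.2
      if m == 1 || m == 74 then
        (length_17 + 2, mainIssue_17.set m.toNat (some (PySem.Str.slice record_17 (some length_17) (some (length_17 + 2)))))
      else if ([3, 7, 8, 12, 24, 25, 26, 44, 56, 59, 60, 67, 69, 71, 72, 73, 82, 85] : List Int).contains m then
        (length_17 + 15, mainIssue_17.set m.toNat (some (PySem.Str.slice record_17 (some length_17) (some (length_17 + 15)))))
      else if ([75, 80] : List Int).contains m then
        (length_17 + 3, mainIssue_17.set m.toNat (some (PySem.Str.slice record_17 (some length_17) (some (length_17 + 3)))))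
      else if m == 76 then
        (length_17 + 20, mainIssue_17.set m.toNat (some (PySem.Str.slice record_17 (some length_17) (some (length_17 + 20)))))
      else if m == 77 then
        (length_17 + 9, mainIssue_17.set m.toNat (some (PySem.Str.slice record_17 (some length_17) (some (length_17 + 9)))))
      else if m == 78 then
        (length_17 + 30, mainIssue_17.set m.toNat (some (PySem.Str.slice record_17 (some length_17) (some (length_17 + 30)))))
      else if m == 79 then
        (length_17 + 8, mainIssue_17.set m.toNat (some (PySem.Str.slice record_17 (some length_17) (some (length_17 + 8)))))
      else if ([81, 83, 84] : List Int).contains m then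
        (length_17 + 1, mainIssue_17.set m.toNat (some (PySem.Str.slice record_17 (some length_17) (some (length_17 + 1)))))
      else if m == 2 then
        (length_17 + 7, mainIssue_17.set m.toNat (some (PySem.Str.slice record_17 (some length_17) (some (length_17 + 7)))))
      else
        (length_17 + 13, mainIssue_17.set m.toNat (some (PySem.Str.slice record_17 (some length_17) (some (length_17 + 13)))))
      ) init
  final.2

-- ===== PORT B =====
def pvWidths17 : List Int :=
  [2, 7, 15, 13, 13, 13, 15, 15, 13, 13, 13, 15, 13, 13, 13, 13, 13,
   13, 13, 13, 13, 13, 13, 15, 15, 15, 13, 13, 13, 13, 13, 13, 13,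
   13, 13, 13, 13, 13, 13, 13, 13, 13, 13, 15, 13, 13, 13, 13, 13,
   13, 13, 13, 13, 13, 13, 15, 13, 13, 15, 15, 13, 13, 13, 13, 13,
   13, 15, 13, 15, 13, 15, 15, 15, 2, 3, 20, 9, 30, 8, 3, 1, 15, 1,
   1, 15]

-- _chop from Source B: recursion on the widths list, consuming the string's suffix.
def pvChop (s : String) : List Int → List (Option String)
  | [] => []
  | w :: ws => some (PySem.Str.slice s none (some w)) :: pvChop (PySem.Str.slice s (some w) none) ws

def parse_record_17_alt (record_17 : String) : List (Option String) :=
  [none] ++ pvChop record_17 pvWidths17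

-- ===== PRECONDITION & SPEC =====
def Spec_parse_record_17 (record_17 : String) (out : List (Option String)) : Prop := out = parse_record_17_alt record_17
instance (record_17 : String) (out : List (Option String)) : Decidable (Spec_parse_record_17 record_17 out) := by unfold Spec_parse_record_17; infer_instance

-- ===== CLAIM =====
def Claim_equal_parse_record_17 : Prop := ∀ (record_17 : String), Dom_parse_record_17 record_17 → Spec_parse_record_17 record_17 (parse_record_17 record_17)

-- ===== LEMMAS AND PROOFS =====
-- proof-only helper: the fields of s seen from absolute offset off
def pvOffChop (s : String) (off : Int) : List Int → List (Option String)
  | [] => []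
  | w :: ws => some (PySem.Str.slice s (some off) (some (off + w))) :: pvOffChop s (off + w) ws

-- s[a:][b:] = s[a+b:] for nonnegative bounds
theorem pvSliceFromFrom (s : String) (a b : Int) (ha : 0 ≤ a) (hb : 0 ≤ b) :
    PySem.Str.slice (PySem.Str.slice s (some a) none) (some b) none
      = PySem.Str.slice s (some (a + b)) none := by
  apply String.toList_inj.mp
  simp only [PySem.Str.toList_slice, PySem.Chars.slice_eq_listSlice,
    PySem.List.slice_from _ ha, PySem.List.slice_from _ hb,
    PySem.List.slice_from _ (by omega : (0:Int) ≤ a + b), List.drop_drop]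
  congr 1
  omega

-- s[a:][:w] = s[a:a+w] for nonnegative bounds
theorem pvSliceKey (s : String) (a w : Int) (ha : 0 ≤ a) (hw : 0 ≤ w) :
    PySem.Str.slice (PySem.Str.slice s (some a) none) none (some w)
      = PySem.Str.slice s (some a) (some (a + w)) := by
  apply String.toList_inj.mp
  simp only [PySem.Str.toList_slice, PySem.Chars.slice_eq_listSlice,
    PySem.List.slice_from _ ha, PySem.List.slice_to _ hw,
    PySem.List.slice_toNat _ ha (by omega : (0:Int) ≤ a + w)]
  congr 1
  omega

theorem pvSliceFromZero (s : String) : PySem.Str.slice s (some 0) none = s := by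
  apply String.toList_inj.mp
  simp [PySem.Str.toList_slice]

-- the string-consuming recursion equals the absolute-offset recursion
theorem pvChop_eq_offChop (ws : List Int) (s : String) (off : Int)
    (hoff : 0 ≤ off) (hws : ∀ w ∈ ws, 0 ≤ w) :
    pvChop (PySem.Str.slice s (some off) none) ws = pvOffChop s off ws := by
  induction ws generalizing off with
  | nil => rfl
  | cons w ws ih =>
    have hw : 0 ≤ w := hws w (List.mem_cons_self ..)
    simp only [pvChop, pvOffChop]
    rw [pvSliceKey s off w hoff hw, pvSliceFromFrom s off w hoff hw,
      ih (off + w) (by omega) (fun x hx => hws x (List.mem_cons_of_mem _ hx))]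

-- ===== VERDICT =====
set_option maxHeartbeats 4000000 in
set_option maxRecDepth 4000 in
theorem parse_record_17_spec : Claim_equal_parse_record_17 := by
  intro r _
  show parse_record_17 r = parse_record_17_alt r
  have hb : parse_record_17_alt r = [none] ++ pvOffChop r 0 pvWidths17 := by
    have := pvChop_eq_offChop pvWidths17 r 0 le_rfl (by decide)
    rw [pvSliceFromZero] at this
    simp only [parse_record_17_alt, this]
  rw [hb]
  have h : PySem.List.pyRange 1 86 1 = [1,2,3,4,5,6,7,8,9,10,11,12,13,14,15,16,17,18,19,20,21,22,23,24,25,26,27,28,29,30,31,32,33,34,35,36,37,38,39,40,41,42,43,44,45,46,47,48,49,50,51,52,53,54,55,56,57,58,59,60,61,62,63,64,65,66,67,68,69,70,71,72,73,74,75,76,77,78,79,80,81,82,83,84,85] := by decide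
  simp only [parse_record_17, pvWidths17, pvOffChop, h]
  simp
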